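-- pv_equiv track=rewrite | github.com/predragf/symc | modules/simulink/simulinkmodel.py | __getLinesFromSameSource
-- ===== SOURCE A (Python) =====
-- def __getLinesFromSameSource(_pivot, _allLines):
--     samelines = []
--     samelines.append(_pivot)
--     indexesForPopping = []
--     for i in range(0, len(_allLines)):
--         if(_allLines[i].get("sourceblockid") == _pivot.get("sourceblockid") and
--             _allLines[i].get("sourceportnumber") == _pivot.get("sourceportnumber")):
--             indexesForPopping.append(i)
--     for itm in reversed(indexesForPopping):
--         samelines.append(_allLines.pop(itm))
--     return samelines
-- ===== SOURCE B (Python) =====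
-- def __getLinesFromSameSource(_pivot, _allLines):
--     key = (_pivot.get("sourceblockid"), _pivot.get("sourceportnumber"))
--     matches = []
--     survivors = []
--     for line in _allLines:
--         if (line.get("sourceblockid"), line.get("sourceportnumber")) == key:
--             matches.append(line)
--         else:
--             survivors.append(line)
--     _allLines[:] = survivors
--     matches.reverse()
--     return [_pivot] + matches
-- ===== Notes on version B (the rewrite author's own statement) =====
-- stated objective: alternative
-- what changed: Replaces the collect-indexes-then-pop-each loop with a single-pass partition into matches and survivors, then one reversal and one in-place assignment of the survivors.
import Mathlib
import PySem

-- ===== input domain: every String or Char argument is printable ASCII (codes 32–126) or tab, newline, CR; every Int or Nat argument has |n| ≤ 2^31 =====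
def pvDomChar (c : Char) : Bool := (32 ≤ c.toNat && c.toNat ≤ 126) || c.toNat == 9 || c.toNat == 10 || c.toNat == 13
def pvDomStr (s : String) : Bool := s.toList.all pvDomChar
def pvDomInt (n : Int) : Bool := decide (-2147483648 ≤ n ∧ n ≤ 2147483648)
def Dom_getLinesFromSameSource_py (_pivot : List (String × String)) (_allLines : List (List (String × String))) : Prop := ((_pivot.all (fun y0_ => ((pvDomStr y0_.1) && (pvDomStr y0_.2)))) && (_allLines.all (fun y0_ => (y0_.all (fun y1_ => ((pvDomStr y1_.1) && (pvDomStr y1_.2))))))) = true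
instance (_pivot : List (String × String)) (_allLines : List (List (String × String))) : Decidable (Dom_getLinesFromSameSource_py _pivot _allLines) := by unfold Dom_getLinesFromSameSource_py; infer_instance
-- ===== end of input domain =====

-- B replaces A's collect-indexes-then-pop-each-index loop by a single-pass partition; the
-- equivalence proved is about the RETURN value only (both Pythons mutate _allLines to the
-- same survivor list; that side effect is not modelled here).

-- shared helper: Python dict.get(k) on the association-list encoding (first match or None)
def pyDictGet (d : List (String × String)) (k : String) : Option String :=
  (d.find? (fun p => p.1 == k)).map (·.2)

-- ===== PORT A =====
def getLinesFromSameSource_py (_pivot : List (String × String)) (_allLines : List (List (String × String))) : List (List (String × String)) :=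
  -- samelines = [_pivot]; for i in range(0, len(_allLines)): collect matching indexes
  let indexesForPopping : List Int :=
    (PySem.List.pyRange 0 (_allLines.length : Int) 1).foldl (fun acc i =>
      if pyDictGet (PySem.List.pyGetD _allLines i []) "sourceblockid" == pyDictGet _pivot "sourceblockid"
          && pyDictGet (PySem.List.pyGetD _allLines i []) "sourceportnumber" == pyDictGet _pivot "sourceportnumber"
      then acc ++ [i] else acc) []
  -- for itm in reversed(indexesForPopping): samelines.append(_allLines.pop(itm))
  let final := indexesForPopping.reverse.foldl
    (fun (st : List (List (String × String)) × List (List (String × String))) itm =>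
      match PySem.List.pop? st.2 itm with
      | some (x, rest) => (st.1 ++ [x], rest)
      | none => st)      -- unreachable: every collected index is in range when popped
    ([_pivot], _allLines)
  final.1

-- ===== PORT B =====
def getLinesFromSameSource_py_alt (_pivot : List (String × String)) (_allLines : List (List (String × String))) : List (List (String × String)) :=
  let key := (pyDictGet _pivot "sourceblockid", pyDictGet _pivot "sourceportnumber")
  let st := _allLines.foldl
    (fun (st : List (List (String × String)) × List (List (String × String))) line =>
      if (pyDictGet line "sourceblockid", pyDictGet line "sourceportnumber") == key
      then (st.1 ++ [line], st.2) else (st.1, st.2 ++ [line]))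
    ([], [])
  [_pivot] ++ st.1.reverse

-- ===== PRECONDITION & SPEC =====
def Spec_getLinesFromSameSource_py (_pivot : List (String × String)) (_allLines : List (List (String × String))) (out : List (List (String × String))) : Prop := out = getLinesFromSameSource_py_alt _pivot _allLines
instance (_pivot : List (String × String)) (_allLines : List (List (String × String))) (out : List (List (String × String))) : Decidable (Spec_getLinesFromSameSource_py _pivot _allLines out) := by unfold Spec_getLinesFromSameSource_py; infer_instance

-- ===== CLAIM (what is proved, stated in full; the proofs are below) =====
def Claim_equal_getLinesFromSameSource_py : Prop := ∀ (_pivot : List (String × String)) (_allLines : List (List (String × String))), Dom_getLinesFromSameSource_py _pivot _allLines → Spec_getLinesFromSameSource_py _pivot _allLines (getLinesFromSameSource_py _pivot _allLines)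

-- ===== LEMMAS AND PROOFS =====

-- the shared match predicate (A's conjunction form)
def pvMatch (_pivot line : List (String × String)) : Bool :=
  pyDictGet line "sourceblockid" == pyDictGet _pivot "sourceblockid"
    && pyDictGet line "sourceportnumber" == pyDictGet _pivot "sourceportnumber"

-- B's pair comparison is A's conjunction
lemma pvMatch_pair (_pivot line : List (String × String)) :
    ((pyDictGet line "sourceblockid", pyDictGet line "sourceportnumber")
      == (pyDictGet _pivot "sourceblockid", pyDictGet _pivot "sourceportnumber"))
      = pvMatch _pivot line := rfl

-- A's index-collecting loop is a filter of the range
def pvIdx (_pivot : List (String × String)) (l : List (List (String × String))) : List Int :=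
  (PySem.List.pyRange 0 (l.length : Int) 1).filter
    (fun i => pvMatch _pivot (PySem.List.pyGetD l i []))

lemma pvIdx_append (_pivot : List (String × String)) (l : List (List (String × String))) (x : List (String × String)) :
    pvIdx _pivot (l ++ [x])
      = pvIdx _pivot l ++ (if pvMatch _pivot x then [(l.length : Int)] else []) := by
  unfold pvIdx
  have h1 : (((l ++ [x]).length : Nat) : Int) = (l.length : Int) + 1 := by simp
  rw [h1, PySem.List.pyRange_one_succ_right (by positivity), List.filter_append]
  congr 1
  · apply List.filter_congr
    intro i hi
    have h := (PySem.List.mem_pyRange_one).1 hi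
    have hlt : i.toNat < l.length := by omega
    congr 1
    rw [PySem.List.pyGetD_of_nonneg, PySem.List.pyGetD_of_nonneg,
      List.getD_eq_getElem?_getD, List.getD_eq_getElem?_getD, List.getElem?_append_left hlt]
    exact h.1
    exact h.1
  · simp only [List.filter_singleton]
    rw [PySem.List.pyGetD_natCast]
    simp

lemma pvIdx_bounds (_pivot : List (String × String)) (l : List (List (String × String))) :
    ∀ i ∈ pvIdx _pivot l, 0 ≤ i ∧ i < (l.length : Int) := by
  intro i hi
  exact (PySem.List.mem_pyRange_one).1 (List.mem_of_mem_filter hi)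

lemma pvIdx_pairwise (_pivot : List (String × String)) (l : List (List (String × String))) :
    (pvIdx _pivot l).Pairwise (· < ·) := by
  exact (PySem.List.pairwise_lt_pyRange_one 0 (l.length : Int)).filter _

-- A's pop loop, abstracted
def pvPopStep (st : List (List (String × String)) × List (List (String × String))) (itm : Int) :
    List (List (String × String)) × List (List (String × String)) :=
  match PySem.List.pop? st.2 itm with
  | some (x, rest) => (st.1 ++ [x], rest)
  | none => st

-- popping at decreasing in-range indexes never touches a trailing suffix
lemma pvPopFold_append (js : List Int) : ∀ (l t s : List (List (String × String))),
    (∀ j ∈ js, 0 ≤ j ∧ j < (l.length : Int)) → js.Pairwise (· > ·) →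
    js.foldl pvPopStep (s, l ++ t)
      = ((js.foldl pvPopStep (s, l)).1, (js.foldl pvPopStep (s, l)).2 ++ t) := by
  induction js with
  | nil => intro l t s _ _; simp
  | cons j rest ih =>
    intro l t s hj hp
    have hj0 := hj j (by simp)
    have hn : j.toNat < l.length := by omega
    obtain ⟨n, rfl⟩ : ∃ n : Nat, j = (n : Int) := ⟨j.toNat, by omega⟩
    rw [Int.toNat_natCast] at hn
    have hpop : PySem.List.pop? l (n : Int) = some (l[n], l.eraseIdx n) :=
      PySem.List.pop?_natCast l n hn
    have hpop2 : PySem.List.pop? (l ++ t) (n : Int) = some (l[n], l.eraseIdx n ++ t) := by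
      rw [PySem.List.pop?_natCast (l ++ t) n (by simp; omega)]
      congr 1
      rw [List.getElem_append_left hn, List.eraseIdx_append_of_lt_length hn t]
    simp only [List.foldl_cons, pvPopStep, hpop, hpop2]
    apply ih
    · intro j' hj'
      have := (hj j' (by simp [hj'])).1
      have hlt : j' < (n : Int) := by
        rcases List.pairwise_cons.1 hp with ⟨h1, _⟩
        exact h1 j' hj'
      constructor
      · exact this
      · rw [List.length_eraseIdx_of_lt hn]; omega
    · exact (List.pairwise_cons.1 hp).2

-- the heart: the pop loop over the reversed matched indexes produces the reversed matches
lemma pvPopFold_spec (_pivot : List (String × String)) (l : List (List (String × String))) (s : List (List (String × String))) :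
    ((pvIdx _pivot l).reverse.foldl pvPopStep (s, l)).1
      = s ++ (l.filter (pvMatch _pivot)).reverse := by
  induction l using List.reverseRecOn generalizing s with
  | nil =>
    simp [pvIdx, PySem.List.pyRange_one_eq_nil (by simp : (0:Int) ≥ 0)]
  | append_singleton l x ih =>
    rw [pvIdx_append, List.filter_append]
    by_cases hx : pvMatch _pivot x = true
    · simp only [hx, if_pos, List.reverse_append, List.reverse_cons, List.reverse_nil,
        List.nil_append, List.singleton_append, List.foldl_cons]
      have hpop : PySem.List.pop? (l ++ [x]) (l.length : Int) = some (x, l) := by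
        rw [PySem.List.pop?_natCast (l ++ [x]) l.length (by simp)]
        congr 1
        rw [List.getElem_concat_length, List.eraseIdx_append_of_length_le (by simp)]
        · simp
        · rfl
      show ((pvIdx _pivot l).reverse.foldl pvPopStep (pvPopStep (s, l ++ [x]) (l.length : Int))).1 = _
      rw [show pvPopStep (s, l ++ [x]) (l.length : Int) = (s ++ [x], l) by
        simp [pvPopStep, hpop]]
      rw [ih]
      simp [hx]
    · simp only [hx, if_neg, Bool.not_eq_true, List.append_nil]
      rw [pvPopFold_append _ l [x] s
        (fun j hj => pvIdx_bounds _pivot l j (List.mem_reverse.1 hj))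
        (List.pairwise_reverse.2 (pvIdx_pairwise _pivot l))]
      rw [ih]
      simp [hx]

-- B's partition loop: first component collects the matches in order
lemma pvAltFold_spec (_pivot : List (String × String)) (l : List (List (String × String)))
    (m s : List (List (String × String))) :
    (l.foldl (fun (st : List (List (String × String)) × List (List (String × String))) line =>
      if (pyDictGet line "sourceblockid", pyDictGet line "sourceportnumber")
            == (pyDictGet _pivot "sourceblockid", pyDictGet _pivot "sourceportnumber")
      then (st.1 ++ [line], st.2) else (st.1, st.2 ++ [line])) (m, s)).1
      = m ++ l.filter (pvMatch _pivot) := by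
  simp only [pvMatch_pair]
  induction l generalizing m s with
  | nil => simp
  | cons line rest ih =>
    simp only [List.foldl_cons, List.filter_cons]
    by_cases h : pvMatch _pivot line = true
    · simp only [h, if_pos]
      rw [ih]
      simp
    · simp only [h, if_neg, Bool.not_eq_true]
      rw [ih]

-- ===== VERDICT (by name: the statement is the Claim_ definition above) =====
theorem getLinesFromSameSource_py_spec : Claim_equal_getLinesFromSameSource_py := by
  intro _pivot _allLines _hdom
  show getLinesFromSameSource_py _pivot _allLines = getLinesFromSameSource_py_alt _pivot _allLines
  have hA : getLinesFromSameSource_py _pivot _allLines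
      = ((pvIdx _pivot _allLines).reverse.foldl pvPopStep ([_pivot], _allLines)).1 := by
    show ((((PySem.List.pyRange 0 (_allLines.length : Int) 1).foldl (fun acc i =>
        if pvMatch _pivot (PySem.List.pyGetD _allLines i []) then acc ++ [i] else acc) []) :
          List Int).reverse.foldl pvPopStep ([_pivot], _allLines)).1 = _
    rw [PySem.List.foldl_append_if_eq_filter, List.nil_append]
    rfl
  have hB : getLinesFromSameSource_py_alt _pivot _allLines
      = [_pivot] ++ ((_allLines.foldl
          (fun (st : List (List (String × String)) × List (List (String × String))) line =>
            if (pyDictGet line "sourceblockid", pyDictGet line "sourceportnumber")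
                  == (pyDictGet _pivot "sourceblockid", pyDictGet _pivot "sourceportnumber")
            then (st.1 ++ [line], st.2) else (st.1, st.2 ++ [line])) ([], [])).1).reverse := rfl
  rw [hA, hB, pvPopFold_spec _pivot _allLines [_pivot],
    pvAltFold_spec _pivot _allLines [] []]
  simp
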